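-- pv_equiv track=rewrite | github.com/NEELSAMEL23/DSA | 7.Sliding_Window/Python/8.py | count_subarrays_less_than_m
-- ===== SOURCE A (Python) =====
-- def count_subarrays_less_than_m(arr, n, m):
--     count = 0
--     for start in range(n):
--         current_sum = 0
--         for end in range(start, n):
--             current_sum += arr[end]
--             if current_sum < m:
--                 count += 1
--             else:
--                 break  # Stop early if the sum reaches or exceeds m
--     return count
-- ===== SOURCE B (Python) =====
-- def count_subarrays_less_than_m(arr, n, m):
--     # Sweep by END index instead of START: keep the running sums of every
--     # start that is still "alive" (its sums so far all < m); a start that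
--     # reaches m is dropped for good, matching A's break.
--     count = 0
--     active = []  # running sums of still-alive starts
--     for i in range(n):
--         x = arr[i]
--         active = [s for s in [a + x for a in active] + [x] if s < m]
--         count += len(active)
--     return count
-- ===== Notes on version B (the rewrite author's own statement) =====
-- stated objective: alternative
-- what changed: Replaced A's start-by-start rescan (outer loop over starts, inner loop extending each until the sum reaches m) by a single left-to-right sweep over end positions that maintains the list of running sums of all still-alive starts, counting the survivors at each step.
import Mathlib
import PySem

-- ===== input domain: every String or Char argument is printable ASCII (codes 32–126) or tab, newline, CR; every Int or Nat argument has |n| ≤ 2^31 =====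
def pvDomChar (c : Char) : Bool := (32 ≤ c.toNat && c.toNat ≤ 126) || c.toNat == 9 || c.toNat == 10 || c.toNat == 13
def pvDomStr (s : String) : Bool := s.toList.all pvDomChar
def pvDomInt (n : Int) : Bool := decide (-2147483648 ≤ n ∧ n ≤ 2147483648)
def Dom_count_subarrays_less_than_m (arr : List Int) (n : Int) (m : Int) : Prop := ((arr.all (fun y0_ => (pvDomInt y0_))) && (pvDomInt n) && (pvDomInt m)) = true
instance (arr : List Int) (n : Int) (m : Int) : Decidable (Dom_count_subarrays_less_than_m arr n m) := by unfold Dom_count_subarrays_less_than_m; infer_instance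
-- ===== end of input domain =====

-- B sweeps once by end position maintaining the running sums of the still-alive starts,
-- instead of A's per-start rescan; same asymptotic cost (objective: alternative).

-- ===== PORT A =====
-- inner 'for end in range(start, n)' of A, with its break, over the remaining range list
def pvAInner (arr : List Int) (m : Int) : List Int → Int → Int → Int
  | [], _, count => count
  | e :: rest, csum, count =>
    let c2 := csum + PySem.List.pyGetD arr e 0
    if c2 < m then pvAInner arr m rest c2 (count + 1) else count

def count_subarrays_less_than_m (arr : List Int) (n : Int) (m : Int) : Int :=
  (PySem.List.pyRange 0 n 1).foldl
    (fun count start => pvAInner arr m (PySem.List.pyRange start n 1) 0 count) 0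

-- ===== PORT B =====
def count_subarrays_less_than_m_alt (arr : List Int) (n : Int) (m : Int) : Int :=
  ((PySem.List.pyRange 0 n 1).foldl
    (fun st i =>
      let x := PySem.List.pyGetD arr i 0
      let active := ((st.2.map (fun a => a + x)) ++ [x]).filter (fun s => decide (s < m))
      (st.1 + (active.length : Int), active))
    ((0 : Int), ([] : List Int))).1

-- ===== PRECONDITION & SPEC =====
-- A raises IndexError (arr[end]) as soon as n exceeds len(arr); exactly those inputs are excluded.
def Pre_count_subarrays_less_than_m (arr : List Int) (n : Int) (m : Int) : Prop :=
  n ≤ (arr.length : Int)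
instance (arr : List Int) (n : Int) (m : Int) : Decidable (Pre_count_subarrays_less_than_m arr n m) := by unfold Pre_count_subarrays_less_than_m; infer_instance

def pvWitness_count_subarrays_less_than_m : List Int × Int × Int := ([1, 2, 3], 3, 4)

def Spec_count_subarrays_less_than_m (arr : List Int) (n : Int) (m : Int) (out : Int) : Prop := out = count_subarrays_less_than_m_alt arr n m
instance (arr : List Int) (n : Int) (m : Int) (out : Int) : Decidable (Spec_count_subarrays_less_than_m arr n m out) := by unfold Spec_count_subarrays_less_than_m; infer_instance

-- ===== CLAIM (what is proved, stated in full; the proofs are below) =====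
def Claim_equal_count_subarrays_less_than_m : Prop := ∀ (arr : List Int) (n : Int) (m : Int), Dom_count_subarrays_less_than_m arr n m → Pre_count_subarrays_less_than_m arr n m → Spec_count_subarrays_less_than_m arr n m (count_subarrays_less_than_m arr n m)

-- ===== LEMMAS AND PROOFS =====

-- length of the first streak of partial sums (starting from acc) staying below m
def pvRun (m : Int) : List Int → Int → Int
  | [], _ => 0
  | x :: rest, acc => if acc + x < m then 1 + pvRun m rest (acc + x) else 0

-- the common reference value: sum of pvRun over all suffixes
def pvS (m : Int) : List Int → Int
  | [] => 0
  | x :: rest => pvRun m (x :: rest) 0 + pvS m rest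

theorem pvAInner_add (arr : List Int) (m : Int) :
    ∀ (es : List Int) (acc c : Int), pvAInner arr m es acc c = c + pvAInner arr m es acc 0 := by
  intro es
  induction es with
  | nil => intro acc c; simp [pvAInner]
  | cons e rest ih =>
    intro acc c
    simp only [pvAInner]
    split_ifs with h
    · rw [ih _ (c + 1), ih _ (0 + 1)]; ring
    · ring

theorem pvAInner_eq_run (arr : List Int) (m : Int) :
    ∀ (k s : Nat), s + k ≤ arr.length → ∀ acc,
      pvAInner arr m (PySem.List.pyRange (s : Int) ((s : Int) + (k : Int)) 1) acc 0
        = pvRun m ((arr.take (s + k)).drop s) acc := by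
  intro k
  induction k with
  | zero =>
    intro s hs acc
    rw [PySem.List.pyRange_one_eq_nil (by omega)]
    rw [List.drop_eq_nil_of_le (by simp)]
    simp [pvAInner, pvRun]
  | succ k ih =>
    intro s hs acc
    rw [PySem.List.pyRange_one_cons (by push_cast; omega)]
    have hslt : s < arr.length := by omega
    have hlen : s < (arr.take (s + (k + 1))).length := by simp; omega
    rw [List.drop_eq_getElem_cons hlen]
    have hget : (arr.take (s + (k + 1)))[s] = arr[s] := by simp [List.getElem_take]
    simp only [pvAInner, pvRun, hget]
    rw [PySem.List.pyGetD_natCast]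
    rw [List.getD_eq_getElem _ _ hslt]
    split_ifs with h
    · rw [pvAInner_add]
      have h2 : (s : Int) + ((k : Nat) + 1 : Nat) = ((s + 1 : Nat) : Int) + (k : Int) := by
        push_cast; omega
      rw [h2]
      have h3 : ((s : Int) + 1) = ((s + 1 : Nat) : Int) := by push_cast; ring
      rw [h3, ih (s + 1) (by omega) (acc + arr[s])]
      have h4 : s + 1 + k = s + (k + 1) := by omega
      rw [h4]
      ring
    · rfl

theorem pvSum_run_eq_pvS (m : Int) :
    ∀ (L : List Int), ((List.range L.length).map (fun s => pvRun m (L.drop s) 0)).sum = pvS m L := by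
  intro L
  induction L with
  | nil => simp [pvS]
  | cons x rest ih =>
    have h : rest.length + 1 = (x :: rest).length := by simp
    rw [← h, List.range_succ_eq_map]
    simp only [List.map_cons, List.map_map, List.sum_cons]
    have h2 : ((List.range rest.length).map ((fun s => pvRun m ((x :: rest).drop s) 0) ∘ Nat.succ))
        = (List.range rest.length).map (fun s => pvRun m (rest.drop s) 0) := by
      apply List.map_congr_left
      intro a _
      simp [Function.comp, List.drop_succ_cons]
    rw [h2, ih]
    simp [pvS]

theorem pvMap_run_cons (m x : Int) (rest : List Int) :
    ∀ (l : List Int),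
      (l.map (fun a => pvRun m (x :: rest) a)).sum
        = (((l.map (fun a => a + x)).filter (fun s => decide (s < m))).length : Int)
          + (((l.map (fun a => a + x)).filter (fun s => decide (s < m))).map (fun a => pvRun m rest a)).sum := by
  intro l
  induction l with
  | nil => simp
  | cons a l ih =>
    rw [List.map_cons, List.sum_cons, ih, List.map_cons, List.filter_cons]
    by_cases h : a + x < m
    · rw [if_pos (by simpa using h)]
      rw [List.length_cons, List.map_cons, List.sum_cons]
      have hr : pvRun m (x :: rest) a = 1 + pvRun m rest (a + x) := by simp [pvRun, h]
      rw [hr]; push_cast; ring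
    · rw [if_neg (by simpa using h)]
      have hr : pvRun m (x :: rest) a = 0 := by simp [pvRun, h]
      rw [hr]; ring

theorem pvB_invariant (m : Int) :
    ∀ (xs : List Int) (c : Int) (active : List Int),
      (xs.foldl
        (fun st x =>
          let act := ((st.2.map (fun a => a + x)) ++ [x]).filter (fun s => decide (s < m))
          (st.1 + (act.length : Int), act))
        (c, active)).1
      = c + (active.map (fun a => pvRun m xs a)).sum + pvS m xs := by
  intro xs
  induction xs with
  | nil =>
    intro c active
    have h : active.map (fun a => pvRun m [] a) = active.map (fun _ => (0 : Int)) := by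
      apply List.map_congr_left; intro a _; rfl
    simp [pvS, h]
  | cons x rest ih =>
    intro c active
    rw [List.foldl_cons]
    show (List.foldl _ (c + _, _) rest).1 = _
    rw [ih]
    rw [pvMap_run_cons m x rest active, List.filter_append]
    have hS : pvS m (x :: rest) = pvRun m (x :: rest) 0 + pvS m rest := rfl
    rw [hS]
    by_cases h : x < m
    · have hfx : [x].filter (fun s => decide (s < m)) = [x] := by simp [h]
      have hr : pvRun m (x :: rest) 0 = 1 + pvRun m rest x := by simp [pvRun, h]
      rw [hfx, hr, List.length_append, List.map_append, List.sum_append]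
      rw [List.length_cons, List.length_nil, List.map_cons, List.map_nil, List.sum_cons, List.sum_nil]
      push_cast; ring
    · have hfx : [x].filter (fun s => decide (s < m)) = [] := by simp [h]
      have hr : pvRun m (x :: rest) 0 = 0 := by simp [pvRun, h]
      rw [hfx, hr, List.append_nil]
      ring

theorem pvA_eq_pvS (arr : List Int) (m : Int) (N : Nat) (hN : N ≤ arr.length) :
    count_subarrays_less_than_m arr (N : Int) m = pvS m (arr.take N) := by
  unfold count_subarrays_less_than_m
  have hcongr := PySem.List.foldl_congr_mem (PySem.List.pyRange 0 (N : Int) 1)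
      (fun count start => pvAInner arr m (PySem.List.pyRange start (N : Int) 1) 0 count)
      (fun count start => count + pvAInner arr m (PySem.List.pyRange start (N : Int) 1) 0 0)
      0 (fun acc x _ => pvAInner_add arr m _ 0 acc)
  rw [hcongr, PySem.List.foldl_add _ (fun start => pvAInner arr m (PySem.List.pyRange start (N : Int) 1) 0 0) 0]
  rw [PySem.List.pyRange_one 0 (N : Int), List.map_map]
  have hNN : ((N : Int) - 0).toNat = N := by omega
  rw [hNN]
  have hmap : (List.range N).map
      ((fun start => pvAInner arr m (PySem.List.pyRange start (N : Int) 1) 0 0) ∘ (fun k : Nat => (0 : Int) + (k : Int)))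
      = (List.range N).map (fun s => pvRun m ((arr.take N).drop s) 0) := by
    apply List.map_congr_left
    intro k hk
    have hk' : k < N := List.mem_range.mp hk
    show pvAInner arr m (PySem.List.pyRange ((0 : Int) + (k : Int)) (N : Int) 1) 0 0 = _
    have h0 : ((0 : Int) + (k : Int)) = (k : Int) := by ring
    have hend : ((N : Int)) = (k : Int) + ((N - k : Nat) : Int) := by omega
    rw [h0, hend, pvAInner_eq_run arr m (N - k) k (by omega) 0]
    have h4 : k + (N - k) = N := by omega
    rw [h4]
  rw [hmap]
  have hlen : (arr.take N).length = N := by simp [List.length_take]; omega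
  have hsum := pvSum_run_eq_pvS m (arr.take N)
  rw [hlen] at hsum
  rw [hsum, zero_add]

theorem pvB_eq_pvS (arr : List Int) (m : Int) (N : Nat) (hN : N ≤ arr.length) :
    count_subarrays_less_than_m_alt arr (N : Int) m = pvS m (arr.take N) := by
  unfold count_subarrays_less_than_m_alt
  have hlen : (arr.take N).length = N := by simp [List.length_take]; omega
  have hcongr := PySem.List.foldl_congr_mem (PySem.List.pyRange 0 (N : Int) 1)
      (fun (st : Int × List Int) i =>
        let x := PySem.List.pyGetD arr i 0
        let active := ((st.2.map (fun a => a + x)) ++ [x]).filter (fun s => decide (s < m))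
        (st.1 + (active.length : Int), active))
      (fun (st : Int × List Int) i =>
        let x := PySem.List.pyGetD (arr.take N) i 0
        let active := ((st.2.map (fun a => a + x)) ++ [x]).filter (fun s => decide (s < m))
        (st.1 + (active.length : Int), active))
      ((0 : Int), ([] : List Int))
      (by
        intro acc i hi
        have hi' := (PySem.List.mem_pyRange_one).mp hi
        have h1 : PySem.List.pyGetD arr i 0 = arr[i.toNat]'(by omega) :=
          PySem.List.pyGetD_eq_getElem arr 0 hi'.1 (by omega)
        have h2 : PySem.List.pyGetD (arr.take N) i 0 = (arr.take N)[i.toNat]'(by omega) :=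
          PySem.List.pyGetD_eq_getElem (arr.take N) 0 hi'.1 (by omega)
        have h3 : (arr.take N)[i.toNat]'(by omega) = arr[i.toNat]'(by omega) := by
          simp [List.getElem_take]
        simp only [h1, h2, h3])
  rw [hcongr]
  have hN' : (N : Int) = ((arr.take N).length : Int) := by exact_mod_cast (congrArg Nat.cast hlen).symm
  rw [hN']
  rw [PySem.List.foldl_pyRange_zero_pyGetD' (arr.take N) 0
      (fun (st : Int × List Int) x =>
        let active := ((st.2.map (fun a => a + x)) ++ [x]).filter (fun s => decide (s < m))
        (st.1 + (active.length : Int), active))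
      ((0 : Int), ([] : List Int))]
  rw [pvB_invariant]
  simp

-- ===== VERDICT (by name: the statement is the Claim_ definition above) =====
theorem count_subarrays_less_than_m_spec : Claim_equal_count_subarrays_less_than_m := by
  intro arr n m _dom hpre
  unfold Spec_count_subarrays_less_than_m
  by_cases hn : n ≤ 0
  · have h := PySem.List.pyRange_one_eq_nil (a := 0) (b := n) hn
    simp [count_subarrays_less_than_m, count_subarrays_less_than_m_alt, h]
  · have hN : n = ((n.toNat : Nat) : Int) := by omega
    have hle : n.toNat ≤ arr.length := by
      unfold Pre_count_subarrays_less_than_m at hpre; omega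
    rw [hN, pvA_eq_pvS arr m n.toNat hle, pvB_eq_pvS arr m n.toNat hle]
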